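-- pv_equiv track=rewrite | github.com/harrydesmond/LF_SMF_HMF_ESR | run_hmf_trimmed_step2.py | format_function
-- ===== SOURCE A (Python) =====
-- def format_function(fcn):
--     """Normalise function strings for deduplication (from sample_top_200.py)."""
--     fcn = fcn.replace('a0', 'C').replace('a1', 'C').replace('a2', 'C').replace('a3', 'C')
--     fcn = fcn.replace('exp(C)', 'C').replace('1/C', 'C')
--     fcn = fcn.replace('Abs(C + x)', 'Abs(C - x)')
--     fcn = fcn.replace('log(Abs(C))', 'C')
--     fcn = fcn.replace(',(C)', ',C')
--     fcn = fcn.replace('Abs(1/C)', 'Abs(C)')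
--
--     const = 0
--     new_fcn = ''
--     for char in fcn:
--         if char == 'C':
--             new_fcn += 'a{}'.format(const)
--             const += 1
--         else:
--             new_fcn += char
--
--     fcn = new_fcn.replace('-a', 'a')
--     return fcn
-- ===== SOURCE B (Python) =====
-- _RULES = [
--     ('a0', 'C'), ('a1', 'C'), ('a2', 'C'), ('a3', 'C'),
--     ('exp(C)', 'C'), ('1/C', 'C'),
--     ('Abs(C + x)', 'Abs(C - x)'),
--     ('log(Abs(C))', 'C'),
--     (',(C)', ',C'),
--     ('Abs(1/C)', 'Abs(C)'),
-- ]
--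
-- def format_function(fcn):
--     """Normalise function strings for deduplication (rules table + split/join)."""
--     for old, new in _RULES:
--         fcn = fcn.replace(old, new)
--     parts = fcn.split('C')
--     pieces = [parts[0]]
--     for i, seg in enumerate(parts[1:]):
--         pieces.append('a%d%s' % (i, seg))
--     return ''.join(pieces).replace('-a', 'a')
-- ===== Notes on version B (the rewrite author's own statement) =====
-- stated objective: faster
-- what changed: Replaces A's ten inline .replace() calls by a fold over a rules table, and A's char-by-char counter loop with quadratic repeated string concatenation by one split on the placeholder plus a join of a list of numbered segments.
import Mathlib
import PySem

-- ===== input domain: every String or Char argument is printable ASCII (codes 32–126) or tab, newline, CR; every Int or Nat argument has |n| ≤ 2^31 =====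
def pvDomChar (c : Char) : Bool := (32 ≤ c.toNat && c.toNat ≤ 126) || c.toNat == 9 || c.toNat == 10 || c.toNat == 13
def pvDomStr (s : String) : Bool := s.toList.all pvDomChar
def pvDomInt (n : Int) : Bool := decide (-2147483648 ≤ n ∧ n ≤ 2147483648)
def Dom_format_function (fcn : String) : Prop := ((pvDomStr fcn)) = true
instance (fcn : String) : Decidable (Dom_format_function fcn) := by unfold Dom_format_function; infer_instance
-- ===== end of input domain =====

-- B drives A's ten hard-coded .replace() calls from a rules table via a fold, and renumbers
-- the constants by one split on 'C' plus a join of numbered segments instead of A's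
-- char-by-char counter loop (objective: faster; a timing run measured B faster).

-- ===== PORT A =====
-- A: ten inline replaces, then a char-by-char numbering loop with state (const, new_fcn)
def format_function (fcn : String) : String :=
  let f1 := PySem.Chars.replace fcn.toList "a0".toList "C".toList
  let f2 := PySem.Chars.replace f1 "a1".toList "C".toList
  let f3 := PySem.Chars.replace f2 "a2".toList "C".toList
  let f4 := PySem.Chars.replace f3 "a3".toList "C".toList
  let f5 := PySem.Chars.replace f4 "exp(C)".toList "C".toList
  let f6 := PySem.Chars.replace f5 "1/C".toList "C".toList
  let f7 := PySem.Chars.replace f6 "Abs(C + x)".toList "Abs(C - x)".toList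
  let f8 := PySem.Chars.replace f7 "log(Abs(C))".toList "C".toList
  let f9 := PySem.Chars.replace f8 ",(C)".toList ",C".toList
  let f10 := PySem.Chars.replace f9 "Abs(1/C)".toList "Abs(C)".toList
  let st := f10.foldl (fun (st : Int × List Char) ch =>
      if ch = 'C' then (st.1 + 1, st.2 ++ 'a' :: PySem.Int.toChars st.1)
      else (st.1, st.2 ++ [ch])) ((0 : Int), ([] : List Char))
  String.ofList (PySem.Chars.replace st.2 "-a".toList "a".toList)

-- ===== PORT B =====
-- B's rules table _RULES
def pvRules : List (List Char × List Char) :=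
  [("a0".toList, "C".toList), ("a1".toList, "C".toList),
   ("a2".toList, "C".toList), ("a3".toList, "C".toList),
   ("exp(C)".toList, "C".toList), ("1/C".toList, "C".toList),
   ("Abs(C + x)".toList, "Abs(C - x)".toList),
   ("log(Abs(C))".toList, "C".toList),
   (",(C)".toList, ",C".toList),
   ("Abs(1/C)".toList, "Abs(C)".toList)]

-- B: fold the rules over the string, split on 'C', collect numbered pieces, join
def format_function_alt (fcn : String) : String :=
  let f := pvRules.foldl (fun s r => PySem.Chars.replace s r.1 r.2) fcn.toList
  let parts := PySem.Chars.splitOn f "C".toList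
  let pieces := ((parts.drop 1).zipIdx).foldl
      (fun acc (x : List Char × Nat) =>
        acc ++ [('a' :: PySem.Int.toChars (x.2 : Int)) ++ x.1]) [parts.headD []]
  String.ofList (PySem.Chars.replace pieces.flatten "-a".toList "a".toList)

-- ===== PRECONDITION & SPEC =====
def Spec_format_function (fcn : String) (out : String) : Prop := out = format_function_alt fcn
instance (fcn : String) (out : String) : Decidable (Spec_format_function fcn out) := by unfold Spec_format_function; infer_instance

-- ===== CLAIM (what is proved, stated in full; the proofs are below) =====
def Claim_equal_format_function : Prop := ∀ (fcn : String), Dom_format_function fcn → Spec_format_function fcn (format_function fcn)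

-- ===== LEMMAS AND PROOFS =====

-- the expansion both sides compute: number the 'C's from k upward
def pvSpec (k : Nat) : List Char → List Char
  | [] => []
  | c :: rest =>
    if c = 'C' then 'a' :: PySem.Int.toChars (k : Int) ++ pvSpec (k + 1) rest
    else c :: pvSpec k rest

-- split on 'C' with an accumulator of the current (reversed) segment
def pvConsume (cur : List Char) : List Char → List (List Char)
  | [] => [cur.reverse]
  | c :: rest => if c = 'C' then cur.reverse :: pvConsume [] rest else pvConsume (c :: cur) rest

def pvAux (k : Nat) : List (List Char) → List Char
  | [] => []
  | s :: ss => ('a' :: PySem.Int.toChars (k : Int)) ++ s ++ pvAux (k + 1) ss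

theorem pvLoopA (cs : List Char) : ∀ (n : Nat) (acc : List Char),
    (cs.foldl (fun (st : Int × List Char) ch =>
      if ch = 'C' then (st.1 + 1, st.2 ++ 'a' :: PySem.Int.toChars st.1)
      else (st.1, st.2 ++ [ch])) ((n : Int), acc)).2 = acc ++ pvSpec n cs := by
  induction cs with
  | nil => intro n acc; simp [pvSpec]
  | cons c rest ih =>
    intro n acc
    by_cases h : c = 'C'
    · subst h
      have hcast : ((n : Int) + 1) = ((n + 1 : Nat) : Int) := by push_cast; ring
      simp only [List.foldl_cons, reduceIte]
      rw [hcast, ih]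
      simp [pvSpec]
    · simp only [List.foldl_cons]
      rw [if_neg h, ih]
      simp [pvSpec, h]

theorem pvConsume_ne_nil (cs cur : List Char) : pvConsume cur cs ≠ [] := by
  induction cs generalizing cur with
  | nil => simp [pvConsume]
  | cons c rest ih =>
    by_cases h : c = 'C' <;> simp [pvConsume, h, ih]

theorem pvGo (l : List Char) : ∀ (fuel : Nat) (cur : List Char) (acc : List (List Char)),
    l.length < fuel →
    PySem.Chars.splitOn.go ['C'] fuel l cur acc = acc.reverse ++ pvConsume cur l := by
  induction l with
  | nil =>
    intro fuel cur acc h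
    match fuel with
    | fuel + 1 => rw [PySem.Chars.splitOn.go] <;> simp [pvConsume]
  | cons c rest ih =>
    intro fuel cur acc h
    match fuel with
    | fuel + 1 =>
      have hf : rest.length < fuel := by simpa using h
      by_cases hc : c = 'C'
      · have hp : List.isPrefixOf ['C'] (c :: rest) = true := by simp [List.isPrefixOf, hc]
        rw [PySem.Chars.splitOn.go, if_pos hp]
        simp only [List.length_singleton, List.drop_succ_cons, List.drop_zero]
        rw [ih fuel [] (cur.reverse :: acc) hf]
        simp [pvConsume, hc]
      · have hp : List.isPrefixOf ['C'] (c :: rest) = false := by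
          simp [List.isPrefixOf]; exact fun h' => hc h'.symm
        rw [PySem.Chars.splitOn.go, if_neg (by simp [hp])]
        rw [ih fuel (c :: cur) acc hf]
        simp [pvConsume, hc]

theorem pvSplitOn (cs : List Char) : PySem.Chars.splitOn cs ['C'] = pvConsume [] cs := by
  rw [PySem.Chars.splitOn, pvGo cs (cs.length + 1) [] [] (by omega)]
  simp

-- B's piece-collecting loop, flattened, appends the numbered segments
theorem pvLoopB (ps : List (List Char)) : ∀ (n : Nat) (p : List (List Char)),
    ((ps.zipIdx n).foldl
      (fun acc (x : List Char × Nat) =>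
        acc ++ [('a' :: PySem.Int.toChars (x.2 : Int)) ++ x.1]) p).flatten
      = p.flatten ++ pvAux n ps := by
  induction ps with
  | nil => intro n p; simp [pvAux]
  | cons s ss ih =>
    intro n p
    simp only [List.zipIdx_cons, List.foldl_cons]
    rw [ih]
    simp [pvAux]

theorem pvJoin (cs : List Char) : ∀ (cur : List Char) (k : Nat),
    (pvConsume cur cs).headD [] ++ pvAux k ((pvConsume cur cs).drop 1)
      = cur.reverse ++ pvSpec k cs := by
  induction cs with
  | nil => intro cur k; simp [pvConsume, pvSpec, pvAux]
  | cons c rest ih =>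
    intro cur k
    by_cases h : c = 'C'
    · subst h
      obtain ⟨q, qs, hq⟩ := List.exists_cons_of_ne_nil (pvConsume_ne_nil rest [])
      have h2 := ih [] (k + 1)
      rw [hq] at h2
      simp only [List.headD_cons, List.drop_one, List.tail_cons, List.reverse_nil,
        List.nil_append] at h2
      simp [pvConsume, pvSpec, pvAux, hq, h2]
    · have h2 := ih (c :: cur) k
      simp only [List.reverse_cons] at h2
      simp only [pvConsume, if_neg h]
      rw [h2]
      simp [pvSpec, h]

-- ===== VERDICT (by name: the statement is the Claim_ definition above) =====
theorem format_function_spec : Claim_equal_format_function := by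
  intro fcn _
  unfold Spec_format_function format_function format_function_alt
  simp only [pvRules, List.foldl_cons, List.foldl_nil]
  generalize (PySem.Chars.replace
    (PySem.Chars.replace
      (PySem.Chars.replace
        (PySem.Chars.replace
          (PySem.Chars.replace
            (PySem.Chars.replace
              (PySem.Chars.replace
                (PySem.Chars.replace
                  (PySem.Chars.replace
                    (PySem.Chars.replace fcn.toList "a0".toList "C".toList)
                    "a1".toList "C".toList) "a2".toList "C".toList) "a3".toList "C".toList)
                "exp(C)".toList "C".toList) "1/C".toList "C".toList)
              "Abs(C + x)".toList "Abs(C - x)".toList) "log(Abs(C))".toList "C".toList)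
          ",(C)".toList ",C".toList) "Abs(1/C)".toList "Abs(C)".toList) = cs
  have hA := pvLoopA cs 0 []
  have hB := pvLoopB ((PySem.Chars.splitOn cs "C".toList).drop 1) 0
      [(PySem.Chars.splitOn cs "C".toList).headD []]
  have hS : PySem.Chars.splitOn cs "C".toList = pvConsume [] cs := pvSplitOn cs
  have hJ := pvJoin cs [] 0
  simp only [List.reverse_nil, List.nil_append, Nat.cast_zero,
    List.flatten_cons, List.flatten_nil, List.append_nil] at hA hB hJ
  rw [hA, hB, hS, hJ]
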